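-- pv_equiv track=rewrite | github.com/xyizhan/recsys2025-main_v2 | methods/contrastive_transformer_psych/model.py | _build_chunk_sizes
-- ===== SOURCE A (Python) =====
-- def _build_chunk_sizes(latent_dim: int, need_levels: int) -> list[int]:
--     base = latent_dim // need_levels
--     rem = latent_dim % need_levels
--     sizes = []
--     for i in range(need_levels):
--         extra = 1 if i < rem else 0
--         sizes.append(max(1, base + extra))
--     return sizes
-- ===== SOURCE B (Python) =====
-- def _build_chunk_sizes(latent_dim: int, need_levels: int) -> list[int]:
--     # Greedy even split: repeatedly take the ceiling share of what is still
--     # left (floored at 1) and subtract it, instead of precomputing divmod.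
--     sizes = []
--     remaining = latent_dim
--     levels_left = need_levels
--     while levels_left > 0:
--         chunk = max(1, -(-remaining // levels_left))
--         sizes.append(chunk)
--         remaining -= chunk
--         levels_left -= 1
--     return sizes
-- ===== Notes on version B (the rewrite author's own statement) =====
-- stated objective: alternative
-- what changed: Replaces the precomputed divmod with per-index remainder comparison by a greedy loop that at each step takes the ceiling of remaining/levels_left (floored at 1) and subtracts it from the remaining dimensions.
import Mathlib
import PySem

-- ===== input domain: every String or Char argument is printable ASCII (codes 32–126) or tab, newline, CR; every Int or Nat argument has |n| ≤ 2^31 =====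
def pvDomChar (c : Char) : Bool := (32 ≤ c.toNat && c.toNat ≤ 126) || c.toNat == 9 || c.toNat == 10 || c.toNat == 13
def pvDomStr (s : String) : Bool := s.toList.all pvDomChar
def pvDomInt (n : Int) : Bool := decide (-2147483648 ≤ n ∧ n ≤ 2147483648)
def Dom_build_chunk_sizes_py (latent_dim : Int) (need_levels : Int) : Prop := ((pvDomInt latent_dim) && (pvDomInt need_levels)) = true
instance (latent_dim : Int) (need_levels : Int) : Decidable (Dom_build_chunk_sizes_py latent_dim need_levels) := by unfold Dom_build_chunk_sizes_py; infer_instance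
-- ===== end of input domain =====

-- B replaces the divmod + per-index remainder test by a greedy loop that takes
-- the ceiling share of the remaining dimensions at each step (alternative; same cost).

-- ===== PORT A =====
def build_chunk_sizes_py (latent_dim : Int) (need_levels : Int) : List Int :=
  let base := PySem.Int.floordiv latent_dim need_levels
  let rem := PySem.Int.mod latent_dim need_levels
  (PySem.List.pyRange 0 need_levels 1).foldl
    (fun sizes i =>
      let extra : Int := if i < rem then 1 else 0
      sizes ++ [max 1 (base + extra)]) []

-- ===== PORT B =====
-- the while loop of Source B, state (sizes, remaining, levels_left); the loop runs
-- exactly levels_left.toNat times, which is the structural fuel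
def build_chunk_sizes_py_altLoop (fuel : Nat) (sizes : List Int) (remaining : Int)
    (levels_left : Int) : List Int :=
  match fuel with
  | 0 => sizes
  | fuel + 1 =>
    if 0 < levels_left then
      let chunk := max 1 (-(PySem.Int.floordiv (-remaining) levels_left))
      build_chunk_sizes_py_altLoop fuel (sizes ++ [chunk]) (remaining - chunk) (levels_left - 1)
    else sizes

def build_chunk_sizes_py_alt (latent_dim : Int) (need_levels : Int) : List Int :=
  build_chunk_sizes_py_altLoop need_levels.toNat [] latent_dim need_levels

-- ===== PRECONDITION & SPEC =====
-- Python A raises ZeroDivisionError at need_levels = 0.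
def Pre_build_chunk_sizes_py (latent_dim : Int) (need_levels : Int) : Prop := need_levels ≠ 0
instance (latent_dim : Int) (need_levels : Int) : Decidable (Pre_build_chunk_sizes_py latent_dim need_levels) := by unfold Pre_build_chunk_sizes_py; infer_instance
def pvWitness_build_chunk_sizes_py : Int × Int := (10, 3)

def Spec_build_chunk_sizes_py (latent_dim : Int) (need_levels : Int) (out : List Int) : Prop := out = build_chunk_sizes_py_alt latent_dim need_levels
instance (latent_dim : Int) (need_levels : Int) (out : List Int) : Decidable (Spec_build_chunk_sizes_py latent_dim need_levels out) := by unfold Spec_build_chunk_sizes_py; infer_instance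

-- ===== CLAIM =====
def Claim_equal_build_chunk_sizes_py : Prop := ∀ (latent_dim : Int) (need_levels : Int), Dom_build_chunk_sizes_py latent_dim need_levels → Pre_build_chunk_sizes_py latent_dim need_levels → Spec_build_chunk_sizes_py latent_dim need_levels (build_chunk_sizes_py latent_dim need_levels)

-- ===== LEMMAS AND PROOFS =====

-- the common closed form both ports are reduced to: rem chunks of size base+1, then base
def pvChunksCF (base rem m : Int) : List Int :=
  List.replicate rem.toNat (max 1 (base + 1)) ++ List.replicate (m - rem).toNat (max 1 base)

-- a foldl that only appends is a map
theorem foldl_append_map {α β : Type} (f : α → β) (xs : List α) (acc : List β) :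
    xs.foldl (fun s i => s ++ [f i]) acc = acc ++ xs.map f := by
  induction xs generalizing acc with
  | nil => simp
  | cons x t ih => simp [List.foldl, ih]

-- a map constant on a one-step range is a replicate
theorem map_pyRange_const {f : Int → Int} {a b : Int} {c : Int}
    (h : ∀ i, a ≤ i → i < b → f i = c) :
    (PySem.List.pyRange a b 1).map f = List.replicate (b - a).toNat c := by
  apply List.eq_replicate_iff.mpr
  constructor
  · simp [PySem.List.length_pyRange_one]
  · intro x hx
    rcases List.mem_map.mp hx with ⟨i, hi, rfl⟩
    rcases (PySem.List.mem_pyRange_one).mp hi with ⟨h1, h2⟩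
    exact h i h1 h2

-- A's port equals the closed form
theorem portA_eq_cf (latent_dim need_levels : Int) (hpre : need_levels ≠ 0) :
    build_chunk_sizes_py latent_dim need_levels =
      pvChunksCF (PySem.Int.floordiv latent_dim need_levels)
        (PySem.Int.mod latent_dim need_levels) need_levels := by
  unfold build_chunk_sizes_py pvChunksCF
  set base := PySem.Int.floordiv latent_dim need_levels with hbase
  set rem := PySem.Int.mod latent_dim need_levels with hrem
  rw [foldl_append_map]
  simp only [List.nil_append]
  rcases lt_or_gt_of_ne hpre with hneg | hpos
  · have hb := PySem.Int.mod_neg_bounds (a := latent_dim) hneg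
    rw [← hrem] at hb
    rw [PySem.List.pyRange_one_eq_nil (by omega)]
    have h1 : rem.toNat = 0 := by omega
    have h2 : (need_levels - rem).toNat = 0 := by omega
    simp [h1, h2]
  · have h0 : 0 ≤ rem := by rw [hrem]; exact PySem.Int.mod_nonneg _ hpos
    have hlt : rem < need_levels := by rw [hrem]; exact PySem.Int.mod_lt _ hpos
    rw [PySem.List.pyRange_one_append 0 rem need_levels h0 (le_of_lt hlt), List.map_append]
    congr 1
    · have := map_pyRange_const (f := fun i => max 1 (base + if i < rem then 1 else 0))
        (a := 0) (b := rem) (c := max 1 (base + 1))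
        (fun i _ h2 => by simp [h2])
      simpa using this
    · exact map_pyRange_const (fun i h1 _ => by simp [not_lt.mpr h1])

-- ceiling division characterised through the division equation
theorem ceil_div_eq (r q rem m : Int) (hm : 0 < m) (heq : r = m * q + rem)
    (h0 : 0 ≤ rem) (h1 : rem < m) :
    -(PySem.Int.floordiv (-r) m) = q + (if 0 < rem then 1 else 0) := by
  rw [PySem.Int.neg_floordiv_neg_eq_iff_of_pos hm]
  split_ifs with h <;> constructor <;> nlinarith

-- once at most levels_left dimensions remain, every chunk is 1
theorem altLoop_ones (k : Nat) : ∀ (acc : List Int) (r m : Int), m = (k : Int) → r ≤ m →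
    build_chunk_sizes_py_altLoop k acc r m = acc ++ List.replicate k 1 := by
  induction k with
  | zero =>
    intro acc r m _ _
    simp [build_chunk_sizes_py_altLoop]
  | succ k ih =>
    intro acc r m hm hr
    have hmpos : 0 < m := by omega
    simp only [build_chunk_sizes_py_altLoop, if_pos hmpos]
    have hle : -(PySem.Int.floordiv (-r) m) ≤ 1 := by
      have h2 : PySem.Int.floordiv (-m) m ≤ PySem.Int.floordiv (-r) m := by
        rw [PySem.Int.floordiv_eq_ediv_of_pos hmpos,
          PySem.Int.floordiv_eq_ediv_of_pos hmpos]
        exact Int.ediv_le_ediv hmpos (by omega)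
      have h3 : PySem.Int.floordiv (-m) m = -1 := by
        rw [PySem.Int.floordiv_eq_iff_of_pos hmpos]; constructor <;> nlinarith
      omega
    have hchunk : max 1 (-(PySem.Int.floordiv (-r) m)) = 1 := by omega
    rw [hchunk, ih (acc ++ [1]) (r - 1) (m - 1) (by omega) (by omega)]
    simp [List.replicate_succ]

-- B's loop equals the closed form, for any division witness (q, rem)
theorem altLoop_eq_cf (k : Nat) : ∀ (acc : List Int) (r q rem m : Int),
    m = (k : Int) → r = m * q + rem → 0 ≤ rem → rem < m →
    build_chunk_sizes_py_altLoop k acc r m = acc ++ pvChunksCF q rem m := by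
  induction k with
  | zero => intro acc r q rem m hm _ h0 h1; exact absurd h1 (by omega)
  | succ k ih =>
    intro acc r q rem m hm heq h0 h1
    have hmpos : 0 < m := by omega
    by_cases hq : q ≤ 0
    · -- small input: every chunk is 1
      have hr : r ≤ m := by nlinarith
      rw [altLoop_ones (k + 1) acc r m hm hr]
      unfold pvChunksCF
      have e1 : max 1 (q + 1) = 1 := by omega
      have e2 : max 1 q = 1 := by omega
      rw [e1, e2, ← List.replicate_add]
      have e3 : rem.toNat + (m - rem).toNat = k + 1 := by omega
      rw [e3]
    · rw [Int.not_le] at hq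
      simp only [build_chunk_sizes_py_altLoop, if_pos hmpos]
      rw [ceil_div_eq r q rem m hmpos heq h0 h1]
      by_cases hrem : 0 < rem
      · -- first rem chunks get base+1
        simp only [if_pos hrem]
        have hchunk : max 1 (q + 1) = q + 1 := by omega
        rw [hchunk,
          ih (acc ++ [q + 1]) (r - (q + 1)) q (rem - 1) (m - 1) (by omega)
            (by linarith [heq]) (by omega) (by omega)]
        unfold pvChunksCF
        have e1 : rem.toNat = (rem - 1).toNat + 1 := by omega
        have e2 : max 1 (q + 1) = q + 1 := by omega
        have e3 : m - rem = m - 1 - (rem - 1) := by ring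
        rw [e1, e2, e3, List.replicate_succ]
        simp
      · -- remainder exhausted: chunks of size base from here on
        simp only [if_neg hrem]
        have hrem0 : rem = 0 := by omega
        have hchunk : max 1 (q + 0) = q := by omega
        rw [hchunk]
        rcases Nat.eq_zero_or_pos k with hk | hk
        · -- last level
          have hm1 : m = 1 := by omega
          subst hk
          unfold pvChunksCF
          simp [build_chunk_sizes_py_altLoop, hrem0, hm1, show max 1 q = q by omega]
        · rw [ih (acc ++ [q]) (r - q) q 0 (m - 1) (by omega)
            (by nlinarith) (by omega) (by omega)]
          unfold pvChunksCF
          simp only [hrem0, Int.toNat_zero, List.replicate_zero, List.nil_append,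
            List.append_assoc]
          have e4 : (m - 0).toNat = (m - 1 - 0).toNat + 1 := by omega
          rw [e4, List.replicate_succ]
          simp [show max 1 q = q by omega]

theorem build_chunk_sizes_py_spec : Claim_equal_build_chunk_sizes_py := by
  intro latent_dim need_levels _ hpre
  unfold Spec_build_chunk_sizes_py build_chunk_sizes_py_alt
  rw [portA_eq_cf latent_dim need_levels hpre]
  rcases lt_or_gt_of_ne hpre with hneg | hpos
  · -- negative need_levels: both sides are empty
    have hf : need_levels.toNat = 0 := by omega
    rw [hf]
    simp only [build_chunk_sizes_py_altLoop]
    have hb := PySem.Int.mod_neg_bounds (a := latent_dim) hneg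
    unfold pvChunksCF
    have h1 : (PySem.Int.mod latent_dim need_levels).toNat = 0 := by omega
    have h2 : (need_levels - PySem.Int.mod latent_dim need_levels).toNat = 0 := by omega
    simp [h1, h2]
  · have h0 := PySem.Int.mod_nonneg (a := latent_dim) hpos
    have h1 := PySem.Int.mod_lt (a := latent_dim) hpos
    have heq := PySem.Int.floordiv_mul_add_mod latent_dim need_levels
    rw [altLoop_eq_cf need_levels.toNat [] latent_dim
      (PySem.Int.floordiv latent_dim need_levels)
      (PySem.Int.mod latent_dim need_levels) need_levels (by omega) (by linarith) h0 h1]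
    simp
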